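-- pv_equiv track=rewrite | github.com/aryahmpillai/SstiScanner | utils.py | is_likely_injectable
-- ===== SOURCE A (Python) =====
-- def is_likely_injectable(param_name: str) -> bool:
--     """
--     Check if a parameter name is likely to be injectable.
--     Some parameters are more likely to be processed by template engines.
--
--     Args:
--         param_name: Name of the parameter
--
--     Returns:
--         True if the parameter is likely injectable, False otherwise
--     """
--     # List of parameter names that are commonly used in templates
--     likely_names = [
--         'template', 'page', 'view', 'theme', 'layout', 'lang', 'language',
--         'display', 'content', 'include', 'file', 'folder', 'path', 'style',
--         'callback', 'return', 'redirect', 'next', 'url', 'uri', 'source',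
--         'target', 'site', 'html', 'text', 'message', 'load', 'debug'
--     ]
--
--     param_lower = param_name.lower()
--
--     # Check for exact match
--     if param_lower in likely_names:
--         return True
--
--     # Check for partial match
--     for name in likely_names:
--         if name in param_lower:
--             return True
--
--     return False
-- ===== SOURCE B (Python) =====
-- # Position-major scan: walk the lowered string once and at each position test
-- # whether any template keyword starts there (leftmost-search automaton style),
-- # instead of A's exact-match branch plus keyword-major "in" loop.
-- _LIKELY = [
--     'template', 'page', 'view', 'theme', 'layout', 'lang', 'language',
--     'display', 'content', 'include', 'file', 'folder', 'path', 'style',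
--     'callback', 'return', 'redirect', 'next', 'url', 'uri', 'source',
--     'target', 'site', 'html', 'text', 'message', 'load', 'debug'
-- ]
--
-- def is_likely_injectable(param_name: str) -> bool:
--     s = param_name.lower()
--     return any(s.startswith(w, i) for i in range(len(s) + 1) for w in _LIKELY)
-- ===== Notes on version B (the rewrite author's own statement) =====
-- stated objective: alternative
-- what changed: B drops A's redundant exact-match branch (subsumed by the substring loop) and replaces the keyword-major substring loop with a single position-major scan of the lowered string that tests each position for a keyword prefix.
import Mathlib
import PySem

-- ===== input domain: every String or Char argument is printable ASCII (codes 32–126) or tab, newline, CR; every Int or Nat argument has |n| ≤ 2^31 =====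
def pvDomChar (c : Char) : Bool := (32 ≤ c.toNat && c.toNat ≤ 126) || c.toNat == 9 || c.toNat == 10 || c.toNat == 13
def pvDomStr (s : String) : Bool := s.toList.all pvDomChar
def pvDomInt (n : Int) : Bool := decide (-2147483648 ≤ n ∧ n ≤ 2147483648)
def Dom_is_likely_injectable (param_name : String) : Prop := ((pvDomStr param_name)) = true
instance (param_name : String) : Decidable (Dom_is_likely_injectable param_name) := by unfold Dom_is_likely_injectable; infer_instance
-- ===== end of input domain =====

-- A checks an exact match then loops keyword-major with `in`; B makes one position-major
-- scan of the lowered string testing each position for a keyword prefix (alternative, same cost).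


-- ===== PORT A =====
def likelyNamesA : List String :=
  ["template", "page", "view", "theme", "layout", "lang", "language",
   "display", "content", "include", "file", "folder", "path", "style",
   "callback", "return", "redirect", "next", "url", "uri", "source",
   "target", "site", "html", "text", "message", "load", "debug"]

def is_likely_injectable (param_name : String) : Bool :=
  let param_lower := PySem.Str.lower param_name
  if likelyNamesA.contains param_lower then true
  else if likelyNamesA.any (fun name => PySem.Str.isIn name param_lower) then true
  else false

-- ===== PORT B =====
def likelyNamesB : List (List Char) :=
  (["template", "page", "view", "theme", "layout", "lang", "language",
    "display", "content", "include", "file", "folder", "path", "style",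
    "callback", "return", "redirect", "next", "url", "uri", "source",
    "target", "site", "html", "text", "message", "load", "debug"] : List String).map String.toList

-- position-major scan: at each suffix, test whether some keyword is a prefix there
def scanB (names : List (List Char)) : List Char → Bool
  | [] => names.any (fun w => w.isPrefixOf ([] : List Char))
  | c :: t => if names.any (fun w => w.isPrefixOf (c :: t)) then true else scanB names t

def is_likely_injectable_alt (param_name : String) : Bool :=
  scanB likelyNamesB (PySem.Str.lower param_name).toList

-- ===== PRECONDITION & SPEC =====
def Spec_is_likely_injectable (param_name : String) (out : Bool) : Prop := out = is_likely_injectable_alt param_name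
instance (param_name : String) (out : Bool) : Decidable (Spec_is_likely_injectable param_name out) := by unfold Spec_is_likely_injectable; infer_instance

-- ===== CLAIM (what is proved, stated in full; the proofs are below) =====
def Claim_equal_is_likely_injectable : Prop := ∀ (param_name : String), Dom_is_likely_injectable param_name → Spec_is_likely_injectable param_name (is_likely_injectable param_name)

-- ===== LEMMAS AND PROOFS =====

-- scanB finds exactly the inputs where some keyword occurs as a prefix of some suffix
theorem scanB_eq_true_iff (names : List (List Char)) (s : List Char) :
    scanB names s = true ↔ ∃ w ∈ names, ∃ j, w <+: s.drop j := by
  induction s with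
  | nil =>
    simp [scanB, List.any_eq_true, List.isPrefixOf_iff_prefix]
  | cons c t ih =>
    simp only [scanB]
    split
    · rename_i h
      simp only [List.any_eq_true, List.isPrefixOf_iff_prefix] at h
      obtain ⟨w, hw, hpre⟩ := h
      simp only [true_iff]
      exact ⟨w, hw, 0, by simpa using hpre⟩
    · rename_i h
      simp only [List.any_eq_true, List.isPrefixOf_iff_prefix] at h
      push Not at h
      rw [ih]
      constructor
      · rintro ⟨w, hw, j, hj⟩
        exact ⟨w, hw, j + 1, by simpa using hj⟩
      · rintro ⟨w, hw, j, hj⟩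
        cases j with
        | zero => exact absurd (by simpa using hj) (by simpa using h w hw)
        | succ j => exact ⟨w, hw, j, by simpa using hj⟩

theorem alt_eq_true_iff (param_name : String) :
    is_likely_injectable_alt param_name = true ↔
      ∃ w ∈ likelyNamesA, PySem.Str.isIn w (PySem.Str.lower param_name) = true := by
  unfold is_likely_injectable_alt likelyNamesB likelyNamesA
  rw [scanB_eq_true_iff]
  constructor
  · rintro ⟨w, hw, j, hj⟩
    simp only [List.mem_map] at hw
    obtain ⟨ws, hws, rfl⟩ := hw
    refine ⟨ws, hws, ?_⟩
    rw [PySem.Str.isIn_iff_infix, ← PySem.Chars.isIn_iff_infix]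
    exact (PySem.Chars.exists_prefix_drop_iff_isIn _ _).mp ⟨j, hj⟩
  · rintro ⟨w, hw, hin⟩
    have : PySem.Chars.isIn w.toList (PySem.Str.lower param_name).toList = true := by
      rw [PySem.Chars.isIn_iff_infix]
      exact (PySem.Str.isIn_iff_infix _ _).mp hin
    obtain ⟨j, hj⟩ := (PySem.Chars.exists_prefix_drop_iff_isIn _ _).mpr this
    exact ⟨w.toList, List.mem_map.mpr ⟨w, hw, rfl⟩, j, hj⟩

theorem a_eq_true_iff (param_name : String) :
    is_likely_injectable param_name = true ↔
      ∃ w ∈ likelyNamesA, PySem.Str.isIn w (PySem.Str.lower param_name) = true := by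
  unfold is_likely_injectable
  by_cases hc : likelyNamesA.contains (PySem.Str.lower param_name) = true
  · simp only [hc, if_true]
    have hm : PySem.Str.lower param_name ∈ likelyNamesA := by simpa using hc
    simp only [true_iff]
    exact ⟨PySem.Str.lower param_name, hm,
      (PySem.Str.isIn_iff_infix _ _).mpr (List.infix_refl _)⟩
  · simp only [if_neg hc, List.any_eq_true]
    split <;> simp_all

-- ===== VERDICT (by name: the statement is the Claim_ definition above) =====
theorem is_likely_injectable_spec : Claim_equal_is_likely_injectable := by
  intro param_name _
  unfold Spec_is_likely_injectable
  rw [Bool.eq_iff_iff, a_eq_true_iff, alt_eq_true_iff]
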